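-- pv_equiv track=rewrite | github.com/ComDec/SPOT-RNA-Repro | repro/training_utils.py | parse_dot_bracket
-- ===== SOURCE A (Python) =====
-- import string
--
-- def parse_dot_bracket(structure):
--     openers = "([{<" + string.ascii_uppercase
--     closers = ")]}>" + string.ascii_lowercase
--     close_to_open = {
--         close_char: open_char for open_char, close_char in zip(openers, closers)
--     }
--     stacks = {open_char: [] for open_char in openers}
--     pairs = []
--
--     for idx, char in enumerate(structure):
--         if char in stacks:
--             stacks[char].append(idx)
--         elif char in close_to_open:
--             open_char = close_to_open[char]
--             if stacks[open_char]:
--                 left = stacks[open_char].pop()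
--                 right = idx
--                 pairs.append((min(left, right), max(left, right)))
--     return sorted(set(pairs))
-- ===== SOURCE B (Python) =====
-- import string
--
-- def parse_dot_bracket(structure):
--     openers = "([{<" + string.ascii_uppercase
--     closers = ")]}>" + string.ascii_lowercase
--     pairs = []
--     for open_char, close_char in zip(openers, closers):
--         stack = []
--         for idx, char in enumerate(structure):
--             if char == open_char:
--                 stack.append(idx)
--             elif char == close_char and stack:
--                 pairs.append((stack.pop(), idx))
--     return sorted(set(pairs))
-- ===== Notes on version B (the rewrite author's own statement) =====
-- stated objective: alternative
-- what changed: A makes a single pass over the string dispatching through a dict of 30 per-bracket-type stacks; B instead loops over the 30 (opener, closer) bracket types and for each makes an independent scan of the string with one plain list stack, concatenating the pairs across types before sorted(set(...)).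
import Mathlib
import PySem

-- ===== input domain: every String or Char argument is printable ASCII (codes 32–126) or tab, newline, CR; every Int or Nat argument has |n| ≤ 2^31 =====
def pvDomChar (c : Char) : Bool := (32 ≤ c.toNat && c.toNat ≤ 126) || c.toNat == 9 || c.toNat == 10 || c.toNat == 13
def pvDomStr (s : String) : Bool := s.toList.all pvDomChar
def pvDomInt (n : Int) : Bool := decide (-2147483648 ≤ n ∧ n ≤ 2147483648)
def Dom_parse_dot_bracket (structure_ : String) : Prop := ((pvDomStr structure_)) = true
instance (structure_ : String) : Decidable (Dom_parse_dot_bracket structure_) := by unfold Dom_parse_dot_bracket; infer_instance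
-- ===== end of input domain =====

-- B replaces A's single table-dispatched pass (a dict of 30 sks) by one independent scan of the
-- string per bracket type with a single list stack; same return value, no speed claim.

-- ===== PORT A =====
-- openers = "([{<" + string.ascii_uppercase ; closers = ")]}>" + string.ascii_lowercase
def openersL : List Char := "([{<ABCDEFGHIJKLMNOPQRSTUVWXYZ".toList
def closersL : List Char := ")]}>abcdefghijklmnopqrstuvwxyz".toList
-- zip(openers, closers)
def zipOC : List (Char × Char) := List.zip openersL closersL
-- close_to_open = {close: open for open, close in zip(openers, closers)}
def closeToOpenD : PySem.Dict Char Char :=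
  PySem.Dict.ofList (zipOC.map (fun oc => (oc.2, oc.1)))
-- stacks = {open_char: [] for open_char in openers}
def stacks0D : PySem.Dict Char (List Int) :=
  PySem.Dict.ofList (openersL.map (fun o => (o, ([] : List Int))))

-- the body of A's 'for idx, char in enumerate(structure)' loop
def stepA (st : PySem.Dict Char (List Int) × List (Int × Int)) (p : Int × Char) :
    PySem.Dict Char (List Int) × List (Int × Int) :=
  if st.1.contains p.2 then
    (st.1.modify p.2 [] (fun l => l ++ [p.1]), st.2)          -- stacks[char].append(idx)
  else if closeToOpenD.contains p.2 then
    let o := (closeToOpenD.get? p.2).getD ' '                 -- close_to_open[char]; the key is present whenever this branch runs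
    let l := st.1.getD o []                                   -- stacks[open_char]; open_char is always a key of sks
    if l = [] then st
    else (st.1.insert o l.dropLast,                           -- left = stacks[open_char].pop()
          st.2 ++ [(min l.getLast! p.1, max l.getLast! p.1)]) -- pairs.append((min(left, right), max(left, right)))
  else st

def parse_dot_bracket (structure_ : String) : List (Int × Int) :=
  let r := (PySem.List.enumerate structure_.toList).foldl stepA (stacks0D, [])
  -- sorted(set(pairs)); Python compares int pairs lexicographically = the Lex order on Int × Int
  PySem.List.sorted (PySem.Set.ofList r.2) (fun p => toLex p) false

-- ===== PORT B =====
-- the body of B's inner 'for idx, char in enumerate(structure)' loop, for bracket type (o, c)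
def stepB (o c : Char) (st : List Int × List (Int × Int)) (p : Int × Char) :
    List Int × List (Int × Int) :=
  if p.2 == o then (st.1 ++ [p.1], st.2)                       -- stack.append(idx)
  else if p.2 == c && !st.1.isEmpty then
    (st.1.dropLast, st.2 ++ [(st.1.getLast!, p.1)])            -- pairs.append((stack.pop(), idx))
  else st

def parse_dot_bracket_alt (structure_ : String) : List (Int × Int) :=
  -- for open_char, close_char in zip(openers, closers): stack = []; for idx, char in enumerate(structure): …
  let pairs := zipOC.foldl
    (fun acc oc => ((PySem.List.enumerate structure_.toList).foldl (stepB oc.1 oc.2) ([], acc)).2) []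
  PySem.List.sorted (PySem.Set.ofList pairs) (fun p => toLex p) false

-- ===== PRECONDITION & SPEC =====
def Spec_parse_dot_bracket (structure_ : String) (out : List (Int × Int)) : Prop := out = parse_dot_bracket_alt structure_
instance (structure_ : String) (out : List (Int × Int)) : Decidable (Spec_parse_dot_bracket structure_ out) := by unfold Spec_parse_dot_bracket; infer_instance

-- ===== CLAIM (what is proved, stated in full; the proofs are below) =====
def Claim_equal_parse_dot_bracket : Prop := ∀ (structure_ : String), Dom_parse_dot_bracket structure_ → Spec_parse_dot_bracket structure_ (parse_dot_bracket structure_)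

-- ===== LEMMAS AND PROOFS =====

set_option maxRecDepth 10000

-- facts about the constant tables
theorem nodupZip : zipOC.Nodup := by decide
theorem mapFst_zipOC : zipOC.map (fun oc => oc.1) = openersL := by decide
theorem mapSnd_zipOC : zipOC.map (fun oc => oc.2) = closersL := by decide
theorem nodup_mapFst : (zipOC.map (fun oc => oc.1)).Nodup := by decide
theorem nodup_mapSnd : (zipOC.map (fun oc => oc.2)).Nodup := by decide
theorem disjointOC : ∀ c ∈ closersL, c ∉ openersL := by
  have h : closersL.all (fun c => !(openersL.contains c)) = true := rfl
  intro c hc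
  simpa using List.all_eq_true.mp h c hc
theorem keys_closeToOpenD : closeToOpenD.keys = closersL := rfl
theorem get?_closeToOpenD : ∀ oc ∈ zipOC, closeToOpenD.get? oc.2 = some oc.1 := by
  have h : zipOC.all (fun oc => closeToOpenD.get? oc.2 == some oc.1) = true := rfl
  intro oc hoc
  simpa using List.all_eq_true.mp h oc hoc
theorem keys_stacks0D : stacks0D.keys = openersL := by decide
theorem getD_stacks0D_mem : ∀ o ∈ openersL, stacks0D.getD o [] = [] := by
  have h : openersL.all (fun o => stacks0D.getD o [] == []) = true := rfl
  intro o ho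
  simpa using List.all_eq_true.mp h o ho

theorem getD_stacks0D (o : Char) : stacks0D.getD o [] = [] := by
  by_cases h : o ∈ openersL
  · exact getD_stacks0D_mem o h
  · have hc : stacks0D.contains o = false := by
      rw [PySem.Dict.contains_eq_decide_mem_keys, keys_stacks0D]
      simpa using h
    exact PySem.Dict.getD_of_not_contains stacks0D [] hc

theorem fst_mem_openers {oc : Char × Char} (h : oc ∈ zipOC) : oc.1 ∈ openersL := by
  rw [← mapFst_zipOC]; exact List.mem_map.mpr ⟨oc, h, rfl⟩

theorem snd_mem_closers {oc : Char × Char} (h : oc ∈ zipOC) : oc.2 ∈ closersL := by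
  rw [← mapSnd_zipOC]; exact List.mem_map.mpr ⟨oc, h, rfl⟩

theorem fst_inj {oc oc' : Char × Char} (h : oc ∈ zipOC) (h' : oc' ∈ zipOC)
    (he : oc.1 = oc'.1) : oc = oc' :=
  List.inj_on_of_nodup_map nodup_mapFst h h' he

theorem snd_inj {oc oc' : Char × Char} (h : oc ∈ zipOC) (h' : oc' ∈ zipOC)
    (he : oc.2 = oc'.2) : oc = oc' :=
  List.inj_on_of_nodup_map nodup_mapSnd h h' he

-- a fold whose step only appends to the second (list) component splits off the accumulator
theorem foldl_snd_frame {σ γ β : Type} (f : σ × List β → γ → σ × List β)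
    (hf : ∀ s p x, f (s, p) x = ((f (s, []) x).1, p ++ (f (s, []) x).2)) :
    ∀ (E : List γ) (s : σ) (p : List β),
      E.foldl f (s, p) = ((E.foldl f (s, [])).1, p ++ (E.foldl f (s, [])).2) := by
  intro E
  induction E with
  | nil => intro s p; simp
  | cons x E ih =>
    intro s p
    simp only [List.foldl_cons]
    rw [hf s p x, ih]
    conv_rhs => rw [show f (s, []) x = ((f (s, []) x).1, (f (s, []) x).2) from rfl, ih]
    simp

theorem stepA_frame : ∀ (d : PySem.Dict Char (List Int)) (p : List (Int × Int)) (x : Int × Char),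
    stepA (d, p) x = ((stepA (d, []) x).1, p ++ (stepA (d, []) x).2) := by
  intro d p x
  simp only [stepA]
  split_ifs <;> simp

theorem stepB_frame (o c : Char) :
    ∀ (st : List Int) (p : List (Int × Int)) (x : Int × Char),
    stepB o c (st, p) x = ((stepB o c (st, []) x).1, p ++ (stepB o c (st, []) x).2) := by
  intro st p x
  simp only [stepB]
  split_ifs <;> simp

-- an identity step of B's scan: the character is neither this opener nor an active closer
theorem stepB_id {o c : Char} {st : List Int} {i : Int} {ch : Char}
    (h1 : ch ≠ o) (h2 : ch = c → st = []) :
    stepB o c (st, []) (i, ch) = (st, []) := by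
  by_cases hc : ch = c
  · subst hc
    simp [stepB, h1, h2 rfl]
  · simp [stepB, h1, hc]

-- the heart: A's one pass yields, as a multiset, the concatenation of B's per-type passes
theorem mainA (E : List (Int × Char)) :
    ∀ (sks : PySem.Dict Char (List Int)),
      sks.keys = openersL →
      E.Pairwise (fun p q => p.1 < q.1) →
      (∀ p ∈ E, ∀ o : Char, ∀ v ∈ sks.getD o [], v < p.1) →
      ((E.foldl stepA (sks, [])).2 : Multiset (Int × Int))
        = (zipOC.map (fun oc =>
            ((E.foldl (stepB oc.1 oc.2) (sks.getD oc.1 [], [])).2 : Multiset (Int × Int)))).sum := by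
  induction E with
  | nil => intro sks _ _ _; simp
  | cons x E ih =>
    intro sks hkeys hpw hlt
    obtain ⟨i, ch⟩ := x
    have hcont : sks.contains ch = decide (ch ∈ openersL) := by
      rw [PySem.Dict.contains_eq_decide_mem_keys, hkeys]
    have hpwE : E.Pairwise (fun p q => p.1 < q.1) := (List.pairwise_cons.mp hpw).2
    have hheadlt : ∀ p ∈ E, (i : Int) < p.1 := fun p hp => (List.pairwise_cons.mp hpw).1 p hp
    simp only [List.foldl_cons]
    by_cases hop : ch ∈ openersL
    · -- opener: push onto stacks[ch]
      have hstep : stepA (sks, []) (i, ch) = (sks.modify ch [] (fun l => l ++ [i]), []) := by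
        simp [stepA, hcont, hop]
      rw [hstep]
      rw [ih (sks.modify ch [] (fun l => l ++ [i]))
          (by
            rw [PySem.Dict.keys_modify,
                PySem.Dict.keys_insert_of_contains _ _ (by rw [hcont]; simpa using hop), hkeys])
          hpwE
          (by
            intro p hp o v hv
            by_cases ho : o = ch
            · subst ho
              rw [PySem.Dict.getD_modify_self] at hv
              rcases List.mem_append.mp hv with h | h
              · exact hlt p (List.mem_cons_of_mem _ hp) o v h
              · simp only [List.mem_singleton] at h; subst h; exact hheadlt p hp
            · rw [PySem.Dict.getD_modify, if_neg ho] at hv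
              exact hlt p (List.mem_cons_of_mem _ hp) o v hv)]
      congr 1
      apply List.map_congr_left
      intro oc hoc
      by_cases h1 : oc.1 = ch
      · have : stepB oc.1 oc.2 (sks.getD oc.1 [], []) (i, ch) =
            (sks.getD oc.1 [] ++ [i], []) := by simp [stepB, h1]
        rw [this, h1, PySem.Dict.getD_modify_self]
      · have h2 : ch ≠ oc.2 := fun he => disjointOC oc.2 (snd_mem_closers hoc) (he ▸ hop)
        rw [stepB_id (fun he => h1 he.symm) (fun he => absurd he h2),
            PySem.Dict.getD_modify, if_neg h1]
    · by_cases hcl : ch ∈ closersL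
      · -- closer
        obtain ⟨oc₀, hoc₀, hsnd⟩ : ∃ oc ∈ zipOC, oc.2 = ch := by
          rw [← mapSnd_zipOC] at hcl
          obtain ⟨oc, h, he⟩ := List.mem_map.mp hcl
          exact ⟨oc, h, he⟩
        have hget : closeToOpenD.get? ch = some oc₀.1 := hsnd ▸ get?_closeToOpenD oc₀ hoc₀
        have hcC : closeToOpenD.contains ch = true := by
          rw [PySem.Dict.contains_eq_decide_mem_keys, keys_closeToOpenD]; simpa using hcl
        have hsndne : ∀ oc ∈ zipOC, oc ≠ oc₀ → oc.2 ≠ ch := by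
          intro oc hoc hne he
          exact hne (snd_inj hoc hoc₀ (he.trans hsnd.symm))
        have hfstne : ∀ oc ∈ zipOC, ch ≠ oc.1 :=
          fun oc hoc he => hop (he ▸ fst_mem_openers hoc)
        by_cases hl : sks.getD oc₀.1 [] = []
        · -- empty stack for this closer: nothing happens anywhere
          have hstep : stepA (sks, []) (i, ch) = (sks, []) := by
            simp [stepA, hcont, hop, hcC, hget, hl]
          rw [hstep]
          rw [ih sks hkeys hpwE
              (fun p hp o v hv => hlt p (List.mem_cons_of_mem _ hp) o v hv)]
          congr 1
          apply List.map_congr_left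
          intro oc hoc
          by_cases hne : oc = oc₀
          · subst hne
            rw [stepB_id (hfstne oc hoc) (fun _ => hl)]
          · rw [stepB_id (hfstne oc hoc) (fun he => absurd he.symm (hsndne oc hoc hne))]
        · -- nonempty stack: pop and record a pair
          obtain ⟨l', b, hlb⟩ := (List.eq_nil_or_concat (sks.getD oc₀.1 [])).resolve_left hl
          have hbmem : b ∈ sks.getD oc₀.1 [] := by rw [hlb]; simp
          have hbi : b < i := hlt (i, ch) List.mem_cons_self oc₀.1 b hbmem
          have hlast? : (sks.getD oc₀.1 []).getLast? = some b := by rw [hlb]; simp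
          have hdrop : (sks.getD oc₀.1 []).dropLast = l' := by rw [hlb]; simp
          have hfstO : oc₀.1 ∈ openersL := fst_mem_openers hoc₀
          have hcontO : sks.contains oc₀.1 = true := by
            rw [PySem.Dict.contains_eq_decide_mem_keys, hkeys]; simpa using hfstO
          have hstep : stepA (sks, []) (i, ch) =
              (sks.insert oc₀.1 l', [(b, i)]) := by
            simp only [stepA, hcont, hop]
            simp [hcC, hget, hl, hdrop, hlast?]
            omega
          rw [hstep]
          set sks' := sks.insert oc₀.1 l' with hsks'
          have hkeys' : sks'.keys = openersL := by
            rw [hsks', PySem.Dict.keys_insert_of_contains _ _ hcontO, hkeys]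
          have hgetD' : ∀ o : Char, sks'.getD o [] =
              if o = oc₀.1 then l' else sks.getD o [] := by
            intro o
            rw [hsks', PySem.Dict.getD_insert]
          have hlt' : ∀ p ∈ E, ∀ o : Char, ∀ v ∈ sks'.getD o [], v < p.1 := by
            intro p hp o v hv
            rw [hgetD'] at hv
            by_cases ho : o = oc₀.1
            · rw [if_pos ho] at hv
              have : v ∈ sks.getD oc₀.1 [] := by
                rw [hlb, List.concat_eq_append]; exact List.mem_append_left _ hv
              exact hlt p (List.mem_cons_of_mem _ hp) oc₀.1 v this
            · rw [if_neg ho] at hv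
              exact hlt p (List.mem_cons_of_mem _ hp) o v hv
          -- LHS: split off the recorded pair, then apply the induction hypothesis
          rw [foldl_snd_frame stepA stepA_frame E sks' [(b, i)]]
          have hLHS : ((List.foldl stepA (sks', []) E).2 : Multiset (Int × Int))
              = (zipOC.map (fun oc =>
                  ((E.foldl (stepB oc.1 oc.2) (sks'.getD oc.1 [], [])).2 : Multiset (Int × Int)))).sum :=
            ih sks' hkeys' hpwE hlt'
          -- RHS: split the sum at oc₀
          obtain ⟨L1, L2, hsplit⟩ := List.append_of_mem hoc₀
          have hnd : (L1 ++ oc₀ :: L2).Nodup := hsplit ▸ nodupZip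
          have hnotL1 : oc₀ ∉ L1 := fun h =>
            (List.disjoint_of_nodup_append hnd) h List.mem_cons_self
          have hnotL2 : oc₀ ∉ L2 := by
            have := (List.nodup_append.mp hnd).2.1
            exact (List.nodup_cons.mp this).1
          have hmemZip : ∀ oc, oc ∈ L1 ∨ oc ∈ L2 → oc ∈ zipOC := by
            intro oc h
            rw [hsplit]
            rcases h with h | h
            · exact List.mem_append_left _ h
            · exact List.mem_append_right _ (List.mem_cons_of_mem _ h)
          have hterm : ∀ oc, oc ∈ L1 ∨ oc ∈ L2 →
              ((E.foldl (stepB oc.1 oc.2)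
                  (stepB oc.1 oc.2 (sks.getD oc.1 [], []) (i, ch))).2 : Multiset (Int × Int))
                = ((E.foldl (stepB oc.1 oc.2) (sks'.getD oc.1 [], [])).2 : Multiset (Int × Int)) := by
            intro oc hmem
            have hoc : oc ∈ zipOC := hmemZip oc hmem
            have hne : oc ≠ oc₀ := by
              rintro rfl
              rcases hmem with h | h
              · exact hnotL1 h
              · exact hnotL2 h
            have hne1 : oc.1 ≠ oc₀.1 := fun he => hne (fst_inj hoc hoc₀ he)
            rw [stepB_id (hfstne oc hoc) (fun he => absurd he.symm (hsndne oc hoc hne)),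
                hgetD' oc.1, if_neg hne1]
          have htermO : ((E.foldl (stepB oc₀.1 oc₀.2)
                  (stepB oc₀.1 oc₀.2 (sks.getD oc₀.1 [], []) (i, ch))).2 : Multiset (Int × Int))
              = (b, i) ::ₘ ((E.foldl (stepB oc₀.1 oc₀.2) (sks'.getD oc₀.1 [], [])).2 : Multiset (Int × Int)) := by
            have hstepO : stepB oc₀.1 oc₀.2 (sks.getD oc₀.1 [], []) (i, ch) =
                (l', [(b, i)]) := by
              simp [stepB, hsnd.symm, hl, hdrop, hlast?]
              exact fun he => hfstne oc₀ hoc₀ (hsnd.symm.trans he)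
            rw [hstepO,
                foldl_snd_frame (stepB oc₀.1 oc₀.2) (stepB_frame oc₀.1 oc₀.2) E l' [(b, i)],
                hgetD' oc₀.1, if_pos rfl]
            simp
          dsimp only
          simp only [List.singleton_append, ← Multiset.cons_coe]
          rw [hLHS, hsplit]
          simp only [List.map_append, List.map_cons, List.sum_append, List.sum_cons]
          rw [htermO,
              List.map_congr_left (fun oc h => hterm oc (Or.inl h)),
              List.map_congr_left (fun oc h => hterm oc (Or.inr h))]
          simp only [← Multiset.singleton_add]
          abel
      · -- neither an opener nor a closer
        have hcC : closeToOpenD.contains ch = false := by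
          rw [PySem.Dict.contains_eq_decide_mem_keys, keys_closeToOpenD]; simpa using hcl
        have hstep : stepA (sks, []) (i, ch) = (sks, []) := by
          simp [stepA, hcont, hop, hcC]
        rw [hstep]
        rw [ih sks hkeys hpwE
            (fun p hp o v hv => hlt p (List.mem_cons_of_mem _ hp) o v hv)]
        congr 1
        apply List.map_congr_left
        intro oc hoc
        have h1 : ch ≠ oc.1 := fun he => hop (he ▸ fst_mem_openers hoc)
        have h2 : ch ≠ oc.2 := fun he => hcl (he ▸ snd_mem_closers hoc)
        rw [stepB_id h1 (fun he => absurd he h2)]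


theorem coe_flatMap {γ β : Type} (l : List γ) (g : γ → List β) :
    ((l.flatMap g : List β) : Multiset β) = (l.map (fun x => ((g x : List β) : Multiset β))).sum := by
  induction l with
  | nil => simp
  | cons x l ih => simp [List.flatMap_cons, ← Multiset.coe_add, ih]

-- ===== VERDICT (by name: the statement is the Claim_ definition above) =====
theorem parse_dot_bracket_spec : Claim_equal_parse_dot_bracket := by
  intro s _hdom
  unfold Spec_parse_dot_bracket parse_dot_bracket parse_dot_bracket_alt
  simp only []
  set E := PySem.List.enumerate s.toList with hE
  have hg : ∀ (acc : List (Int × Int)) (oc : Char × Char),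
      (E.foldl (stepB oc.1 oc.2) ([], acc)).2
        = acc ++ (E.foldl (stepB oc.1 oc.2) ([], [])).2 := by
    intro acc oc
    rw [foldl_snd_frame (stepB oc.1 oc.2) (stepB_frame oc.1 oc.2) E [] acc]
  have hB : zipOC.foldl (fun acc oc => (E.foldl (stepB oc.1 oc.2) ([], acc)).2) []
      = zipOC.flatMap (fun oc => (E.foldl (stepB oc.1 oc.2) ([], [])).2) := by
    have hfun : (fun (acc : List (Int × Int)) (oc : Char × Char) =>
        (E.foldl (stepB oc.1 oc.2) ([], acc)).2)
        = fun acc oc => acc ++ (E.foldl (stepB oc.1 oc.2) ([], [])).2 := by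
      funext acc oc; exact hg acc oc
    rw [hfun, PySem.List.foldl_append_eq_flatMap]
    exact List.nil_append _
  have hmain := mainA E stacks0D keys_stacks0D
      (PySem.List.pairwise_lt_enumerate s.toList 0)
      (by intro p _ o v hv; rw [getD_stacks0D] at hv; simp at hv)
  have hmain' : ((E.foldl stepA (stacks0D, [])).2 : Multiset (Int × Int))
      = ((zipOC.flatMap (fun oc => (E.foldl (stepB oc.1 oc.2) ([], [])).2) : List (Int × Int)) : Multiset (Int × Int)) := by
    rw [hmain, coe_flatMap]
    exact congrArg List.sum (List.map_congr_left (fun oc _ => by rw [getD_stacks0D]))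
  have hperm : ((E.foldl stepA (stacks0D, [])).2).Perm
      (zipOC.foldl (fun acc oc => (E.foldl (stepB oc.1 oc.2) ([], acc)).2) []) := by
    rw [hB]
    exact Multiset.coe_eq_coe.mp hmain'
  apply PySem.List.sorted_eq_sorted_of_perm
  · intro a b hab; exact toLex.injective hab
  · rw [List.perm_ext_iff_of_nodup (PySem.Set.nodup_ofList _) (PySem.Set.nodup_ofList _)]
    intro a
    rw [PySem.Set.mem_ofList, PySem.Set.mem_ofList]
    exact ⟨fun h => hperm.mem_iff.mp h, fun h => hperm.mem_iff.mpr h⟩
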